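-- pv_equiv track=rewrite | github.com/Saee2803/NLP_Smart_Assistant | reasoning/incident_commander.py | _get_database_breakdown
-- ===== SOURCE A (Python) =====
-- from typing import Dict, List, Optional, Tuple, Any
--
-- def _get_database_breakdown(alerts: List[Dict]) -> Dict[str, Dict]:
--     """Get per-database alert breakdown."""
--     db_stats = {}
--
--     for alert in alerts:
--         db = (alert.get("target_name") or alert.get("target") or "UNKNOWN").upper()
--         severity = (alert.get("severity") or "UNKNOWN").upper()
--
--         if db not in db_stats:
--             db_stats[db] = {"total": 0, "CRITICAL": 0, "WARNING": 0, "INFO": 0}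
--
--         db_stats[db]["total"] += 1
--         if severity in db_stats[db]:
--             db_stats[db][severity] += 1
--
--     return db_stats
-- ===== SOURCE B (Python) =====
-- def _get_database_breakdown(alerts):
--     """Get per-database alert breakdown: group alerts by db, then count each group."""
--     groups = {}
--     for alert in alerts:
--         db = (alert.get("target_name") or alert.get("target") or "UNKNOWN").upper()
--         groups.setdefault(db, []).append(alert)
--
--     breakdown = {}
--     for db, group in groups.items():
--         sevs = [(a.get("severity") or "UNKNOWN").upper() for a in group]
--         breakdown[db] = {
--             "total": len(group),
--             "CRITICAL": sevs.count("CRITICAL"),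
--             "WARNING": sevs.count("WARNING"),
--             "INFO": sevs.count("INFO"),
--         }
--     return breakdown
-- ===== Notes on version B (the rewrite author's own statement) =====
-- stated objective: alternative
-- what changed: A keeps one running nested-dict of counters updated per alert in a single pass; B first builds an ordered index grouping alerts by database key, then constructs each database's breakdown in a second pass by counting severities within its group.
import Mathlib
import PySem

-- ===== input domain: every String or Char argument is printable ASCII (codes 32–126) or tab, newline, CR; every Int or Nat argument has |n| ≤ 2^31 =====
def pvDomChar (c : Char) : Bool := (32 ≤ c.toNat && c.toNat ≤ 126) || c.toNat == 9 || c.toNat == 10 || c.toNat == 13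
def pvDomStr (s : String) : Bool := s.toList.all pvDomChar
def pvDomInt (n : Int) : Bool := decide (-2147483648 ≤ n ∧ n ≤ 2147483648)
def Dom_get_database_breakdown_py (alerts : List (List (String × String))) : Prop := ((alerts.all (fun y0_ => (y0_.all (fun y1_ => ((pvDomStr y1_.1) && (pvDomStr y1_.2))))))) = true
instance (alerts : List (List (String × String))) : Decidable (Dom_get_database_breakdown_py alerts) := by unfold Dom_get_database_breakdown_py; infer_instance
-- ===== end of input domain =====

-- B replaces A's one-pass nested-counter fold by a group-by-db index pass followed by a
-- per-group counting pass; same return value (objective: alternative decomposition).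

-- ===== PORT A =====
-- `x or y` on an optional string: the first truthy (non-None, non-empty) value
def pyOrStr (o : Option String) (b : String) : String :=
  match o with
  | some s => if s = "" then b else s
  | none => b

-- db = (alert.get("target_name") or alert.get("target") or "UNKNOWN").upper()
def dbKey (alert : List (String × String)) : String :=
  PySem.Str.upper (pyOrStr ((PySem.Dict.mk alert).get? "target_name")
    (pyOrStr ((PySem.Dict.mk alert).get? "target") "UNKNOWN"))

-- severity = (alert.get("severity") or "UNKNOWN").upper()
def sevKey (alert : List (String × String)) : String :=
  PySem.Str.upper (pyOrStr ((PySem.Dict.mk alert).get? "severity") "UNKNOWN")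

def initStats : PySem.Dict String Int :=
  PySem.Dict.ofList [("total", 0), ("CRITICAL", 0), ("WARNING", 0), ("INFO", 0)]

-- one iteration of A's loop body
def stepA (st : PySem.Dict String (PySem.Dict String Int)) (alert : List (String × String)) :
    PySem.Dict String (PySem.Dict String Int) :=
  let db := dbKey alert
  let severity := sevKey alert
  let st1 := if st.contains db then st else st.insert db initStats
  let st2 := st1.modify db PySem.Dict.empty (fun inner => inner.modify "total" 0 (· + 1))
  if (st2.getD db PySem.Dict.empty).contains severity then
    st2.modify db PySem.Dict.empty (fun inner => inner.modify severity 0 (· + 1))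
  else st2

def get_database_breakdown_py (alerts : List (List (String × String))) :
    List (String × List (String × Int)) :=
  ((alerts.foldl stepA PySem.Dict.empty).items).map (fun p => (p.1, p.2.items))

-- ===== PORT B =====
-- first pass: groups.setdefault(db, []).append(alert)
def gstep (g : PySem.Dict String (List (List (String × String)))) (alert : List (String × String)) :
    PySem.Dict String (List (List (String × String))) :=
  g.modify (dbKey alert) [] (fun xs => xs ++ [alert])

-- second pass: one group's breakdown dict
def breakdownB (group : List (List (String × String))) : List (String × Int) :=
  let sevs := group.map sevKey
  [("total", (group.length : Int)), ("CRITICAL", (sevs.count "CRITICAL" : Int)),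
   ("WARNING", (sevs.count "WARNING" : Int)), ("INFO", (sevs.count "INFO" : Int))]

def get_database_breakdown_py_alt (alerts : List (List (String × String))) :
    List (String × List (String × Int)) :=
  ((alerts.foldl gstep PySem.Dict.empty).items).map (fun p => (p.1, breakdownB p.2))

-- ===== PRECONDITION & SPEC =====
def Spec_get_database_breakdown_py (alerts : List (List (String × String))) (out : List (String × List (String × Int))) : Prop := out = get_database_breakdown_py_alt alerts
instance (alerts : List (List (String × String))) (out : List (String × List (String × Int))) : Decidable (Spec_get_database_breakdown_py alerts out) := by unfold Spec_get_database_breakdown_py; infer_instance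

-- ===== CLAIM (what is proved, stated in full; the proofs are below) =====
def Claim_equal_get_database_breakdown_py : Prop := ∀ (alerts : List (List (String × String))), Dom_get_database_breakdown_py alerts → Spec_get_database_breakdown_py alerts (get_database_breakdown_py alerts)

-- ===== LEMMAS AND PROOFS =====

-- the inner dict A holds for a group of alerts, expressed through B's counts
def innerFor (group : List (List (String × String))) : PySem.Dict String Int :=
  PySem.Dict.mk [("total", (group.length : Int)),
                 ("CRITICAL", ((group.map sevKey).count "CRITICAL" : Int)),
                 ("WARNING", ((group.map sevKey).count "WARNING" : Int)),
                 ("INFO", ((group.map sevKey).count "INFO" : Int))]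

-- rendering of B's group dict into A's stats dict
def mapVals (G : PySem.Dict String (List (List (String × String)))) :
    PySem.Dict String (PySem.Dict String Int) :=
  PySem.Dict.mk (G.items.map (fun p => (p.1, innerFor p.2)))

lemma upperChar_ne_t (c : Char) : PySem.Chars.upperChar c ≠ 't' := by
  unfold PySem.Chars.upperChar PySem.Chars.islower
  split
  · intro h
    rename_i hlo
    simp only [Bool.and_eq_true, decide_eq_true_eq, Char.le_def, UInt32.le_iff_toNat_le] at hlo
    have hc : 97 ≤ c.toNat ∧ c.toNat ≤ 122 := hlo
    have h2 := congrArg Char.toNat h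
    rw [Char.toNat_ofNat] at h2
    have hv : (c.toNat - 32).isValidChar := Or.inl (by omega)
    rw [if_pos hv] at h2
    have : ('t').toNat = 116 := rfl
    omega
  · intro h
    rename_i hlo
    subst h
    simp at hlo

lemma upper_ne_total (s : String) : PySem.Str.upper s ≠ "total" := by
  intro h
  have h' : (PySem.Str.upper s).toList = "total".toList := by rw [h]
  rw [PySem.Str.toList_upper] at h'
  have ht : 't' ∈ PySem.Chars.upper s.toList := by rw [h']; decide
  unfold PySem.Chars.upper at ht
  obtain ⟨c, _, hc⟩ := List.mem_map.1 ht
  exact upperChar_ne_t c hc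

lemma get?_mapVals (G : PySem.Dict String (List (List (String × String)))) (k : String) :
    (mapVals G).get? k = (G.get? k).map innerFor := by
  obtain ⟨l⟩ := G
  simp [mapVals, PySem.Dict.get?, List.find?_map, Option.map_map, Function.comp_def]

lemma contains_mapVals (G : PySem.Dict String (List (List (String × String)))) (k : String) :
    (mapVals G).contains k = G.contains k := by
  rw [PySem.Dict.contains_eq_isSome_get?, PySem.Dict.contains_eq_isSome_get?, get?_mapVals]
  simp

lemma mapVals_insert (G : PySem.Dict String (List (List (String × String)))) (k : String)
    (v : List (List (String × String))) :
    (mapVals G).insert k (innerFor v) = mapVals (G.insert k v) := by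
  apply PySem.Dict.ext
  show ((mapVals G).insert k (innerFor v)).items = (PySem.Dict.mk ((G.insert k v).items.map _)).items
  rw [PySem.Dict.items_insert, PySem.Dict.items_insert, contains_mapVals]
  by_cases h : G.contains k = true
  · simp only [h, if_true, mapVals, List.map_map]
    apply List.map_congr_left
    intro p _
    by_cases hp : p.1 = k <;> simp [hp]
  · simp only [Bool.not_eq_true] at h
    simp [h, mapVals]

lemma inner_step (g : List (List (String × String))) (a : List (String × String)) :
    (if ((innerFor g).modify "total" 0 (· + 1)).contains (sevKey a)
     then ((innerFor g).modify "total" 0 (· + 1)).modify (sevKey a) 0 (· + 1)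
     else (innerFor g).modify "total" 0 (· + 1)) = innerFor (g ++ [a]) := by
  have hne : sevKey a ≠ "total" := by unfold sevKey; exact upper_ne_total _
  have h0 : ("total" == sevKey a) = false := beq_eq_false_iff_ne.mpr (Ne.symm hne)
  have hI : (innerFor g).modify "total" 0 (· + 1) =
      PySem.Dict.mk [("total", (g.length : Int) + 1),
                 ("CRITICAL", ((g.map sevKey).count "CRITICAL" : Int)),
                 ("WARNING", ((g.map sevKey).count "WARNING" : Int)),
                 ("INFO", ((g.map sevKey).count "INFO" : Int))] := rfl
  rw [hI]
  have hcont : (PySem.Dict.mk [("total", (g.length : Int) + 1),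
                 ("CRITICAL", ((g.map sevKey).count "CRITICAL" : Int)),
                 ("WARNING", ((g.map sevKey).count "WARNING" : Int)),
                 ("INFO", ((g.map sevKey).count "INFO" : Int))]).contains (sevKey a)
      = ("CRITICAL" == sevKey a || "WARNING" == sevKey a || "INFO" == sevKey a) := by
    simp [PySem.Dict.contains, h0, Bool.or_assoc]
  rw [hcont]
  by_cases hc : sevKey a = "CRITICAL"
  · rw [hc]
    simp only [innerFor, List.map_append, List.count_append, List.length_append, List.map_cons,
      List.map_nil, List.count_cons, List.count_nil, hc]
    norm_num
    rfl
  · have hC : ("CRITICAL" == sevKey a) = false := beq_eq_false_iff_ne.mpr (Ne.symm hc)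
    by_cases hw : sevKey a = "WARNING"
    · rw [hw]
      simp only [innerFor, List.map_append, List.count_append, List.length_append, List.map_cons,
        List.map_nil, List.count_cons, List.count_nil, hw]
      norm_num
      rfl
    · have hW : ("WARNING" == sevKey a) = false := beq_eq_false_iff_ne.mpr (Ne.symm hw)
      by_cases hi : sevKey a = "INFO"
      · rw [hi]
        simp only [innerFor, List.map_append, List.count_append, List.length_append, List.map_cons,
          List.map_nil, List.count_cons, List.count_nil, hi]
        norm_num
        rfl
      · have hA : ("INFO" == sevKey a) = false := beq_eq_false_iff_ne.mpr (Ne.symm hi)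
        simp only [hC, hW, hA, Bool.or_false, if_neg Bool.false_ne_true]
        simp [innerFor, List.count_append, List.count_cons,
          beq_eq_false_iff_ne.mpr hc, beq_eq_false_iff_ne.mpr hw, beq_eq_false_iff_ne.mpr hi]

-- the modify-unfolded form of inner_step, matching the goal shape in step_comm (defeq)
lemma inner_step' (g : List (List (String × String))) (a : List (String × String)) :
    (if ((innerFor g).insert "total" ((innerFor g).getD "total" 0 + 1)).contains (sevKey a) = true
     then ((innerFor g).insert "total" ((innerFor g).getD "total" 0 + 1)).insert (sevKey a)
            (((innerFor g).insert "total" ((innerFor g).getD "total" 0 + 1)).getD (sevKey a) 0 + 1)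
     else (innerFor g).insert "total" ((innerFor g).getD "total" 0 + 1)) = innerFor (g ++ [a]) :=
  inner_step g a

lemma initStats_eq : initStats = innerFor [] := by decide

lemma step_comm (G : PySem.Dict String (List (List (String × String))))
    (a : List (String × String)) :
    stepA (mapVals G) a = mapVals (gstep G a) := by
  unfold stepA gstep
  simp only [PySem.Dict.modify, contains_mapVals]
  by_cases h : G.contains (dbKey a) = true
  · have hs : (G.get? (dbKey a)).isSome := by
      rw [← PySem.Dict.contains_eq_isSome_get?]; exact h
    obtain ⟨g', hg'⟩ := Option.isSome_iff_exists.mp hs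
    have hgD : G.getD (dbKey a) [] = g' := PySem.Dict.getD_of_get?_eq_some G [] hg'
    have hMgD : (mapVals G).getD (dbKey a) PySem.Dict.empty = innerFor g' := by
      rw [PySem.Dict.getD_eq_get?_getD, get?_mapVals, hg']; rfl
    simp only [h, if_true, hMgD, PySem.Dict.getD_insert_self, PySem.Dict.insert_insert_self]
    rw [← apply_ite ((mapVals G).insert (dbKey a)), inner_step', mapVals_insert, hgD]
  · simp only [Bool.not_eq_true] at h
    have hgD : G.getD (dbKey a) [] = [] := PySem.Dict.getD_of_not_contains G [] h
    simp only [h, Bool.false_eq_true, if_false, PySem.Dict.getD_insert_self,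
      PySem.Dict.insert_insert_self, initStats_eq]
    rw [← apply_ite ((mapVals G).insert (dbKey a)), inner_step', mapVals_insert, hgD]

lemma fold_comm (l : List (List (String × String))) :
    l.foldl stepA PySem.Dict.empty = mapVals (l.foldl gstep PySem.Dict.empty) := by
  induction l using List.reverseRecOn with
  | nil => rfl
  | append_singleton l a ih => rw [List.foldl_append, List.foldl_append]; simp [ih, step_comm]

-- ===== VERDICT (by name: the statement is the Claim_ definition above) =====
theorem get_database_breakdown_py_spec : Claim_equal_get_database_breakdown_py := by
  intro alerts _
  unfold Spec_get_database_breakdown_py get_database_breakdown_py get_database_breakdown_py_alt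
  rw [fold_comm]
  simp [mapVals, List.map_map, Function.comp_def, innerFor, breakdownB]
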